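-- pv_equiv track=rewrite | github.com/a81257/ns3 | ns-3-ub-tools/traffic_maker/build_traffic.py | generate_all_rank_table
-- ===== SOURCE A (Python) =====
-- def generate_all_rank_table(total_host, n_comm_size, rank_mapping='linear'):
--     """
--     Generate rank tables for all communication domains.
--
--     Args:
--         total_host: Total number of hosts
--         n_comm_size: Communication domain size (hosts per domain)
--         rank_mapping: Strategy for assigning ranks to domains
--             - 'linear': [0,1,2,3][4,5,6,7]... (default)
--             - 'round-robin': [0,2,4,6][1,3,5,7]...
--     """
--     if total_host % n_comm_size != 0:
--         raise ValueError("total_host % n_comm_size != 0")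
--     n_comm_num = total_host // n_comm_size
--     all_rank_table = []
--
--     if rank_mapping == 'linear':
--         # Linear: consecutive ranks in each domain [0,1,2,3][4,5,6,7]
--         for comm_id in range(n_comm_num):
--             rt = list(range(comm_id * n_comm_size, (comm_id + 1) * n_comm_size))
--             all_rank_table.append(rt)
--     elif rank_mapping == 'round-robin':
--         # Round-robin: stride across all ranks [0,2,4,6][1,3,5,7]
--         for comm_id in range(n_comm_num):
--             rt = [comm_id + i * n_comm_num for i in range(n_comm_size)]
--             all_rank_table.append(rt)
--     else:
--         raise ValueError(f"Unknown rank_mapping strategy: {rank_mapping}. Choose 'linear' or 'round-robin'")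
--
--     return all_rank_table
-- ===== SOURCE B (Python) =====
-- def generate_all_rank_table(total_host, n_comm_size, rank_mapping='linear'):
--     if total_host % n_comm_size != 0:
--         raise ValueError("total_host % n_comm_size != 0")
--     n_comm_num = total_host // n_comm_size
--     if rank_mapping == 'linear':
--         key = lambda r: r // n_comm_size
--     elif rank_mapping == 'round-robin':
--         key = lambda r: r % n_comm_num
--     else:
--         raise ValueError(f"Unknown rank_mapping strategy: {rank_mapping}. Choose 'linear' or 'round-robin'")
--     tables = {}
--     for r in range(total_host):
--         tables.setdefault(key(r), []).append(r)
--     return [tables.get(c, []) for c in range(n_comm_num)]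
-- ===== Notes on version B (the rewrite author's own statement) =====
-- stated objective: alternative
-- what changed: B replaces A's per-domain loops that recompute range arithmetic with a single bucketing pass: it walks all ranks 0..total_host-1 once, grouping each rank into a dict keyed by its domain (r // n_comm_size for 'linear', r % n_comm_num for 'round-robin'), then reads the tables back in domain order.
import Mathlib
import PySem

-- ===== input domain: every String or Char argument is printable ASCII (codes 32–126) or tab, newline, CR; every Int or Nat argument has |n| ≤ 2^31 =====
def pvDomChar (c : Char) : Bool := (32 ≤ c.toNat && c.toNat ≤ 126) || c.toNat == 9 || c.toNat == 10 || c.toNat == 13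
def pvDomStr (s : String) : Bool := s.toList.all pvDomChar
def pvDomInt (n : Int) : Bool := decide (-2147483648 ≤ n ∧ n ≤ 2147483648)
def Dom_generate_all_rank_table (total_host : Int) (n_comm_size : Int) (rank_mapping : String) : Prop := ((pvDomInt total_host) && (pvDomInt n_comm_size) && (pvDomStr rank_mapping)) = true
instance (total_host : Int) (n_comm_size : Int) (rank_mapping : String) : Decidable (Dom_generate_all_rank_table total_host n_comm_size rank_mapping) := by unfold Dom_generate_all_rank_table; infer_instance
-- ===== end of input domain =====

-- B replaces A's per-domain table construction with a single bucketing pass over all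
-- ranks, grouping each rank into a dict keyed by its domain, then reading the tables
-- back in domain order; objective: alternative algorithm, same asymptotic cost.

-- ===== PORT A =====
def generate_all_rank_table (total_host : Int) (n_comm_size : Int) (rank_mapping : String) : List (List Int) :=
  -- 'if total_host % n_comm_size != 0: raise' and the final 'raise ValueError' are
  -- excluded by Pre_; the port returns [] on those excluded inputs.
  let n_comm_num := PySem.Int.floordiv total_host n_comm_size
  if rank_mapping == "linear" then
    (PySem.List.pyRange 0 n_comm_num 1).foldl
      (fun all_rank_table comm_id =>
        all_rank_table ++ [PySem.List.pyRange (comm_id * n_comm_size) ((comm_id + 1) * n_comm_size) 1]) []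
  else if rank_mapping == "round-robin" then
    (PySem.List.pyRange 0 n_comm_num 1).foldl
      (fun all_rank_table comm_id =>
        all_rank_table ++ [(PySem.List.pyRange 0 n_comm_size 1).map (fun i => comm_id + i * n_comm_num)]) []
  else []

-- ===== PORT B =====
def generate_all_rank_table_alt (total_host : Int) (n_comm_size : Int) (rank_mapping : String) : List (List Int) :=
  -- the two raises are excluded by Pre_; the port returns [] on those excluded inputs
  let n_comm_num := PySem.Int.floordiv total_host n_comm_size
  if rank_mapping == "linear" || rank_mapping == "round-robin" then
    let key : Int → Int :=
      if rank_mapping == "linear" then fun r => PySem.Int.floordiv r n_comm_size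
      else fun r => PySem.Int.mod r n_comm_num
    -- tables.setdefault(key(r), []).append(r) = Dict.modify (key r) [] (· ++ [r])
    let tables := (PySem.List.pyRange 0 total_host 1).foldl
      (fun d r => PySem.Dict.modify d (key r) [] (· ++ [r])) PySem.Dict.empty
    (PySem.List.pyRange 0 n_comm_num 1).map (fun c => tables.getD c [])
  else []

-- ===== PRECONDITION & SPEC =====
-- Pre_ excludes exactly the inputs on which A raises: n_comm_size = 0 (ZeroDivisionError),
-- total_host not divisible by n_comm_size (ValueError), or an unknown rank_mapping (ValueError).
def Pre_generate_all_rank_table (total_host : Int) (n_comm_size : Int) (rank_mapping : String) : Prop :=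
  n_comm_size ≠ 0 ∧ PySem.Int.mod total_host n_comm_size = 0 ∧
    (rank_mapping = "linear" ∨ rank_mapping = "round-robin")
instance (total_host : Int) (n_comm_size : Int) (rank_mapping : String) : Decidable (Pre_generate_all_rank_table total_host n_comm_size rank_mapping) := by unfold Pre_generate_all_rank_table; infer_instance

def pvWitness_generate_all_rank_table : Int × Int × String := (8, 2, "round-robin")

def Spec_generate_all_rank_table (total_host : Int) (n_comm_size : Int) (rank_mapping : String) (out : List (List Int)) : Prop := out = generate_all_rank_table_alt total_host n_comm_size rank_mapping
instance (total_host : Int) (n_comm_size : Int) (rank_mapping : String) (out : List (List Int)) : Decidable (Spec_generate_all_rank_table total_host n_comm_size rank_mapping out) := by unfold Spec_generate_all_rank_table; infer_instance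

-- ===== CLAIM (what is proved, stated in full; the proofs are below) =====
def Claim_equal_generate_all_rank_table : Prop := ∀ (total_host : Int) (n_comm_size : Int) (rank_mapping : String), Dom_generate_all_rank_table total_host n_comm_size rank_mapping → Pre_generate_all_rank_table total_host n_comm_size rank_mapping → Spec_generate_all_rank_table total_host n_comm_size rank_mapping (generate_all_rank_table total_host n_comm_size rank_mapping)

-- ===== LEMMAS AND PROOFS =====

-- B's grouping fold, read back at key c, is the filter of the scanned list by key.
theorem pv_getD_group_fold (key : Int → Int) (c : Int) (l : List Int) :
    ((l.foldl (fun d r => PySem.Dict.modify d (key r) [] (· ++ [r])) PySem.Dict.empty).getD c [])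
      = l.filter (fun r => key r == c) := by
  have h := PySem.Dict.getD_foldl_modify_append (l := l.map (fun r => (key r, r)))
    (d := (PySem.Dict.empty : PySem.Dict Int (List Int))) (c := c)
  rw [List.foldl_map] at h
  rw [h]
  simp [List.filter_map, Function.comp_def]

-- filtering the full rank range by 'r // cs == c' gives A's linear table (positive cs)
theorem pv_filter_linear (cs num c : Int) (hcs : 0 < cs) (hc0 : 0 ≤ c) (hc : c < num) :
    (PySem.List.pyRange 0 (num * cs) 1).filter (fun r => PySem.Int.floordiv r cs == c)
      = PySem.List.pyRange (c * cs) ((c + 1) * cs) 1 := by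
  have hlow : (PySem.List.pyRange 0 (c * cs) 1).filter
      (fun r => PySem.Int.floordiv r cs == c) = [] := by
    apply List.filter_eq_nil_iff.2
    intro r hr
    rw [PySem.List.mem_pyRange_one] at hr
    simp only [beq_iff_eq]
    rw [PySem.Int.floordiv_eq_iff_of_pos hcs]
    exact fun hEq => absurd hEq.1 (not_le.2 hr.2)
  have hmid : (PySem.List.pyRange (c * cs) ((c + 1) * cs) 1).filter
      (fun r => PySem.Int.floordiv r cs == c)
      = PySem.List.pyRange (c * cs) ((c + 1) * cs) 1 := by
    apply List.filter_eq_self.2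
    intro r hr
    rw [PySem.List.mem_pyRange_one] at hr
    simp only [beq_iff_eq]
    rw [PySem.Int.floordiv_eq_iff_of_pos hcs]
    exact ⟨hr.1, hr.2⟩
  have hhigh : (PySem.List.pyRange ((c + 1) * cs) (num * cs) 1).filter
      (fun r => PySem.Int.floordiv r cs == c) = [] := by
    apply List.filter_eq_nil_iff.2
    intro r hr
    rw [PySem.List.mem_pyRange_one] at hr
    simp only [beq_iff_eq]
    rw [PySem.Int.floordiv_eq_iff_of_pos hcs]
    exact fun hEq => absurd hEq.2 (not_lt.2 hr.1)
  rw [PySem.List.pyRange_one_append 0 (c * cs) (num * cs) (by positivity) (by nlinarith),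
    PySem.List.pyRange_one_append (c * cs) ((c + 1) * cs) (num * cs) (by nlinarith) (by nlinarith),
    List.filter_append, List.filter_append, hlow, hmid, hhigh]
  simp

-- filtering the first num*j ranks by 'r % num == c' gives the strided table (positive num)
theorem pv_filter_rr (num c : Int) (hnum : 0 < num) (hc0 : 0 ≤ c) (hc : c < num) :
    ∀ j : Nat,
      (PySem.List.pyRange 0 (num * j) 1).filter (fun r => PySem.Int.mod r num == c)
        = (PySem.List.pyRange 0 (j : Int) 1).map (fun i => c + i * num) := by
  intro j
  induction j with
  | zero => simp [PySem.List.pyRange_one_eq_nil]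
  | succ m ih =>
      have hd : num * ((m : Int) + 1) = num * m + num := by ring
      have hmod : ∀ r : Int, num * m ≤ r → r < num * ((m : Int) + 1) →
          PySem.Int.mod r num = r - num * m := by
        intro r h1 h2
        rw [PySem.Int.mod_eq_emod_of_pos hnum]
        conv_lhs => rw [show r = (r - num * m) + num * m by ring]
        rw [Int.add_mul_emod_self_left]
        exact Int.emod_eq_of_lt (by omega) (by omega)
      have hlow : (PySem.List.pyRange (num * m) (num * m + c) 1).filter
          (fun r => PySem.Int.mod r num == c) = [] := by
        apply List.filter_eq_nil_iff.2
        intro r hr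
        rw [PySem.List.mem_pyRange_one] at hr
        simp only [beq_iff_eq]
        rw [hmod r (by omega) (by omega)]
        omega
      have hone : (PySem.List.pyRange (num * m + c) (num * m + c + 1) 1).filter
          (fun r => PySem.Int.mod r num == c) = [num * m + c] := by
        rw [PySem.List.pyRange_one_singleton]
        apply List.filter_eq_self.2
        intro r hr
        rw [List.mem_singleton] at hr
        subst hr
        simp only [beq_iff_eq]
        rw [hmod _ (by omega) (by omega)]
        omega
      have hhigh : (PySem.List.pyRange (num * m + c + 1) (num * ((m : Int) + 1)) 1).filter
          (fun r => PySem.Int.mod r num == c) = [] := by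
        apply List.filter_eq_nil_iff.2
        intro r hr
        rw [PySem.List.mem_pyRange_one] at hr
        simp only [beq_iff_eq]
        rw [hmod r (by omega) (by omega)]
        omega
      push_cast
      rw [PySem.List.pyRange_one_append 0 (num * m) (num * ((m : Int) + 1))
          (by positivity) (by omega), List.filter_append, ih,
        PySem.List.pyRange_one_append (num * m) (num * m + c) (num * ((m : Int) + 1))
          (by omega) (by omega), List.filter_append, hlow,
        PySem.List.pyRange_one_append (num * m + c) (num * m + c + 1) (num * ((m : Int) + 1))
          (by omega) (by omega), List.filter_append, hone, hhigh,
        PySem.List.pyRange_one_succ_right (by positivity), List.map_append]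
      simp [mul_comm, add_comm]

-- ===== VERDICT (by name: the statement is the Claim_ definition above) =====
theorem generate_all_rank_table_spec : Claim_equal_generate_all_rank_table := by
  intro th cs rm _ hpre
  obtain ⟨hcs, hmod, hrm⟩ := hpre
  have hth : PySem.Int.floordiv th cs * cs = th := by
    have h := PySem.Int.floordiv_mul_add_mod th cs
    rw [hmod] at h; omega
  unfold Spec_generate_all_rank_table generate_all_rank_table generate_all_rank_table_alt
  set num := PySem.Int.floordiv th cs with hnumdef
  rcases hrm with h | h <;> subst h
  · -- linear
    rw [if_pos (by decide), if_pos (by decide), if_pos (by decide),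
      PySem.List.foldl_append_singleton_eq_map, List.nil_append]
    apply List.map_congr_left
    intro c hcmem
    rw [PySem.List.mem_pyRange_one] at hcmem
    obtain ⟨hc0, hc⟩ := hcmem
    rw [pv_getD_group_fold]
    rcases lt_trichotomy cs 0 with hneg | hzero | hpos
    · have hthneg : th < 0 := by nlinarith
      rw [PySem.List.pyRange_one_eq_nil (le_of_lt hthneg),
        PySem.List.pyRange_one_eq_nil (by nlinarith)]
      simp
    · exact absurd hzero hcs
    · rw [← hth, ← pv_filter_linear cs num c hpos hc0 hc]
  · -- round-robin
    rw [if_neg (by decide), if_pos (by decide), if_pos (by decide), if_neg (by decide)]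
    rw [PySem.List.foldl_append_singleton_eq_map, List.nil_append]
    apply List.map_congr_left
    intro c hcmem
    rw [PySem.List.mem_pyRange_one] at hcmem
    obtain ⟨hc0, hc⟩ := hcmem
    have hnum : 0 < num := by omega
    rw [pv_getD_group_fold]
    rcases lt_trichotomy cs 0 with hneg | hzero | hpos
    · have hthneg : th < 0 := by nlinarith
      rw [PySem.List.pyRange_one_eq_nil (le_of_lt hthneg),
        PySem.List.pyRange_one_eq_nil (le_of_lt hneg)]
      simp
    · exact absurd hzero hcs
    · have hj : th = num * (cs.toNat : Int) := by
        rw [Int.toNat_of_nonneg (le_of_lt hpos)]; omega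
      rw [hj, pv_filter_rr num c hnum hc0 hc cs.toNat,
        Int.toNat_of_nonneg (le_of_lt hpos)]
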